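-- pv_equiv track=rewrite | github.com/mrtalhim/cipher | cipher_function/helper_function/helper_function.py | present_ciphertext
-- ===== SOURCE A (Python) =====
-- def present_ciphertext(ciphertext, split=False):
--     ciphertext = ciphertext.upper()
--     if split:
--         n = 5
--         ciphertext = ''.join([x for x in ciphertext if x.isalpha()])
--         ciphertext = [ciphertext[i:i+n] for i in range(0, len(ciphertext), n)]
--         ciphertext = ' '.join(list(ciphertext))
--     return ciphertext
-- ===== SOURCE B (Python) =====
-- def present_ciphertext(ciphertext, split=False):
--     ciphertext = ciphertext.upper()
--     if not split:
--         return ciphertext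
--     count = 0
--     buf = []
--     for ch in ciphertext:
--         if ch.isalpha():
--             if count > 0 and count % 5 == 0:
--                 buf.append(' ')
--             buf.append(ch)
--             count += 1
--     return ''.join(buf)
-- ===== Notes on version B (the rewrite author's own statement) =====
-- stated objective: alternative
-- what changed: Replaces A's filter-then-index-slice-then-join pipeline (three passes and intermediate chunk lists) with one fused pass over the uppercased string that maintains a running letter count and inserts a space before every fifth letter.
import Mathlib
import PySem

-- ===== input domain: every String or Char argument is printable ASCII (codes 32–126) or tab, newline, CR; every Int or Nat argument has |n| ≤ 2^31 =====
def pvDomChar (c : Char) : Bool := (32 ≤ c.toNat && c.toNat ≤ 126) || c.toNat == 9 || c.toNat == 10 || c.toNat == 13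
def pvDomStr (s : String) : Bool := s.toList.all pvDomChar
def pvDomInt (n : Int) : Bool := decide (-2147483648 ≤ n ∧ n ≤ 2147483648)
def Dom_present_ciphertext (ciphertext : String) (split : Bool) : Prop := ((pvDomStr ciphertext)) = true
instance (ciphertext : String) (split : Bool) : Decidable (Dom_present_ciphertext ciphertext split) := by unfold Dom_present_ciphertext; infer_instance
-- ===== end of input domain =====

-- ===== PORT A =====
-- ciphertext.upper(); if split: filter isalpha, slice into 5-char pieces by index, ' '.join
def present_ciphertext (ciphertext : String) (split : Bool) : String :=
  let u := PySem.Str.upper ciphertext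
  if split then
    let letters := u.toList.filter (fun x => PySem.Chars.isalpha x)
    let chunks := (PySem.List.pyRange 0 (letters.length : Int) 5).map
      (fun i => PySem.List.slice letters (some i) (some (i + 5)))
    String.ofList (PySem.Chars.join [' '] chunks)
  else u

-- ===== PORT B =====
-- single pass: running count of letters, space before every fifth letter
def present_ciphertext_alt (ciphertext : String) (split : Bool) : String :=
  let u := PySem.Str.upper ciphertext
  if split then
    let r := u.toList.foldl
      (fun (st : Nat × List Char) ch =>
        if PySem.Chars.isalpha ch then
          (st.1 + 1, st.2 ++ (if 0 < st.1 ∧ st.1 % 5 = 0 then [' ', ch] else [ch]))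
        else st)
      (0, [])
    String.ofList r.2
  else u

-- ===== PRECONDITION & SPEC =====
def Spec_present_ciphertext (ciphertext : String) (split : Bool) (out : String) : Prop := out = present_ciphertext_alt ciphertext split
instance (ciphertext : String) (split : Bool) (out : String) : Decidable (Spec_present_ciphertext ciphertext split out) := by unfold Spec_present_ciphertext; infer_instance

-- ===== CLAIM (what is proved, stated in full; the proofs are below) =====
def Claim_equal_present_ciphertext : Prop := ∀ (ciphertext : String) (split : Bool), Dom_present_ciphertext ciphertext split → Spec_present_ciphertext ciphertext split (present_ciphertext ciphertext split)

-- ===== LEMMAS AND PROOFS =====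

-- the spacing B's loop produces over the alphabetic characters, starting at count c
def ins (c : Nat) : List Char → List Char
  | [] => []
  | x :: xs => (if 0 < c ∧ c % 5 = 0 then [' ', x] else [x]) ++ ins (c + 1) xs

theorem foldB_eq_ins (ls : List Char) : ∀ (c : Nat) (acc : List Char),
    ls.foldl (fun (st : Nat × List Char) ch =>
        (st.1 + 1, st.2 ++ (if 0 < st.1 ∧ st.1 % 5 = 0 then [' ', ch] else [ch]))) (c, acc)
      = (c + ls.length, acc ++ ins c ls) := by
  induction ls with
  | nil => simp [ins]
  | cons x xs ih =>
      intro c acc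
      simp only [List.foldl_cons, ih, ins, List.length_cons, List.append_assoc]
      rw [show c + 1 + xs.length = c + (xs.length + 1) by omega]

theorem ins_shift (ls : List Char) : ∀ c, 0 < c → ins (c + 5) ls = ins c ls := by
  induction ls with
  | nil => intros; rfl
  | cons x xs ih =>
      intro c hc
      have h5 : (0 < c + 5 ∧ (c + 5) % 5 = 0) ↔ (0 < c ∧ c % 5 = 0) := by omega
      simp only [ins]
      rw [show c + 5 + 1 = (c + 1) + 5 by omega, ih (c + 1) (by omega)]
      congr 1
      simp only [h5]

theorem ins_five (ls : List Char) :
    ins 0 ls = ls.take 5 ++ ins 5 (ls.drop 5) := by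
  rcases ls with _ | ⟨a, _ | ⟨b, _ | ⟨c, _ | ⟨d, _ | ⟨e, rest⟩⟩⟩⟩⟩ <;>
    simp [ins]

theorem ins_five_space (x : Char) (xs : List Char) :
    ins 5 (x :: xs) = ' ' :: ins 0 (x :: xs) := by
  simp only [ins]
  rw [show (5:Nat) + 1 = 1 + 5 by omega, ins_shift xs 1 (by omega)]
  simp

-- A's chunk list (index slicing) rewritten as take/drop chunks
def chunksOf (ls : List Char) : List (List Char) :=
  (List.range ((ls.length + 4) / 5)).map (fun k => (ls.drop (5 * k)).take 5)

theorem chunks_eq_chunksOf (ls : List Char) :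
    (PySem.List.pyRange 0 (ls.length : Int) 5).map
      (fun i => PySem.List.slice ls (some i) (some (i + 5))) = chunksOf ls := by
  rw [PySem.List.pyRange_of_pos 0 (ls.length : Int) (by norm_num), List.map_map]
  unfold chunksOf
  have hN : (if (0:Int) < (ls.length : Int)
      then (((ls.length : Int) - 0 + 5 - 1) / 5).toNat else 0) = (ls.length + 4) / 5 := by
    split_ifs with h
    · have h4 : ((ls.length : Int) - 0 + 5 - 1) = ((ls.length + 4 : Nat) : Int) := by
        push_cast; ring
      have h5 : (5 : Int) = ((5 : Nat) : Int) := rfl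
      rw [h4, h5, ← Int.natCast_div, Int.toNat_natCast]
    · have h0 : ls.length = 0 := by omega
      simp [h0]
  rw [hN]
  refine List.map_congr_left (fun k _ => ?_)
  have h1 : (0 : Int) + 5 * (k : Int) = ((5 * k : Nat) : Int) := by push_cast; ring
  have h2 : ((5 * k : Nat) : Int) + 5 = ((5 * k + 5 : Nat) : Int) := by push_cast; ring
  simp only [Function.comp_apply]
  rw [h1, h2, PySem.List.slice_natCast]
  congr 1
  omega

theorem chunksOf_cons (ls : List Char) (h : ls ≠ []) :
    chunksOf ls = ls.take 5 :: chunksOf (ls.drop 5) := by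
  unfold chunksOf
  have hl : 0 < ls.length := List.length_pos_of_ne_nil h
  have hd : (ls.drop 5).length = ls.length - 5 := List.length_drop ..
  have hN : (ls.length + 4) / 5 = ((ls.drop 5).length + 4) / 5 + 1 := by
    rw [hd]; omega
  rw [hN, List.range_succ_eq_map, List.map_cons, List.map_map]
  simp only [Nat.mul_zero, List.drop_zero]
  congr 1
  refine List.map_congr_left (fun k _ => ?_)
  simp only [Function.comp_apply, List.drop_drop]
  congr 2
  omega

theorem join_chunksOf_eq_ins (n : Nat) : ∀ (ls : List Char), ls.length ≤ n →
    PySem.Chars.join [' '] (chunksOf ls) = ins 0 ls := by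
  induction n with
  | zero =>
      intro ls hlen
      have h0 : ls = [] := List.eq_nil_of_length_eq_zero (by omega)
      subst h0
      simp [chunksOf, ins, PySem.Chars.join_nil]
  | succ n ih =>
      intro ls hlen
      rcases eq_or_ne ls [] with rfl | hne
      · simp [chunksOf, ins, PySem.Chars.join_nil]
      · rw [chunksOf_cons ls hne, ins_five ls]
        rcases hd : ls.drop 5 with _ | ⟨x, xs⟩
        · have hle : ls.length ≤ 5 := by
            have h := congrArg List.length hd
            simp only [List.length_drop, List.length_nil] at h
            omega
          simp [chunksOf, PySem.Chars.join_singleton, List.take_of_length_le hle, ins]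
        · have hlen' : (x :: xs).length ≤ n := by
            have h := congrArg List.length hd
            simp only [List.length_drop, List.length_cons] at h
            simp only [List.length_cons]
            omega
          rw [chunksOf_cons (x :: xs) (by simp), PySem.Chars.join_cons_cons,
            ← chunksOf_cons (x :: xs) (by simp), ih (x :: xs) hlen', ins_five_space]
          simp

theorem present_ciphertext_spec : Claim_equal_present_ciphertext := by
  intro ct split _
  unfold Spec_present_ciphertext present_ciphertext present_ciphertext_alt
  cases split with
  | false => simp
  | true =>
      simp only [if_true]
      set u := (PySem.Str.upper ct).toList with hu
      rw [← List.foldl_filter, foldB_eq_ins, chunks_eq_chunksOf,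
        join_chunksOf_eq_ins (u.filter (fun x => PySem.Chars.isalpha x)).length _ le_rfl]
      simp
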